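-- pv_equiv track=rewrite | github.com/Cyril-44/C-Cpp | Functions/Compress/Compress.py | process_trigraph
-- ===== SOURCE A (Python) =====
-- def process_trigraph(s):
--     trigraphs = {
--         '=': '#',
--         '/': '\\',
--         '\'': '^',
--         '(': '[',
--         ')': ']',
--         '<': '{',
--         '>': '}',
--         '!': '|',
--         '-': '~'
--     }
--     for ch, replacement in trigraphs.items():
--         s = s.replace(f"??{ch}", replacement)
--     return s
-- ===== SOURCE B (Python) =====
-- def process_trigraph(s):
--     trigraphs = {
--         '=': '#',
--         '/': '\\',
--         '\'': '^',
--         '(': '[',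
--         ')': ']',
--         '<': '{',
--         '>': '}',
--         '!': '|',
--         '-': '~'
--     }
--     out = []
--     i = 0
--     n = len(s)
--     while i < n:
--         if s[i] == '?' and i + 1 < n and s[i + 1] == '?' and i + 2 < n and s[i + 2] in trigraphs:
--             out.append(trigraphs[s[i + 2]])
--             i += 3
--         else:
--             out.append(s[i])
--             i += 1
--     return ''.join(out)
-- ===== Notes on version B (the rewrite author's own statement) =====
-- stated objective: alternative
-- what changed: Replaced A's nine sequential full-string str.replace passes (one per trigraph, each building an intermediate string) with a single left-to-right indexed scan that consults the trigraph dict once per position, emitting either the replacement (advancing by 3) or the current character (advancing by 1).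
import Mathlib
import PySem

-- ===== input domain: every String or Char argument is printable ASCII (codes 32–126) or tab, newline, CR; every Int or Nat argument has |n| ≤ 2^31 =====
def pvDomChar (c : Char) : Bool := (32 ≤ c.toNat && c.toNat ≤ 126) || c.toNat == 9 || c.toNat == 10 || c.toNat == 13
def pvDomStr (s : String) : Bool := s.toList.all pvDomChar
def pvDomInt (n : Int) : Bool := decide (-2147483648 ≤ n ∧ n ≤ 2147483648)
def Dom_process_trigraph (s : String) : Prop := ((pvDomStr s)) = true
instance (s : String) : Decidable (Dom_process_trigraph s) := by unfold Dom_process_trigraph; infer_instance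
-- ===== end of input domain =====

-- B replaces A's nine sequential str.replace passes by a single left-to-right scan
-- with a lookup table: one pass over the string instead of nine (objective: alternative;
-- not measured faster in CPython, where str.replace runs in C).

-- ===== PORT A =====
-- the trigraphs dict of A, as an association list in insertion order
def pvTrigraphs : List (String × String) :=
  [("=", "#"), ("/", "\\"), ("'", "^"), ("(", "["), (")", "]"),
   ("<", "{"), (">", "}"), ("!", "|"), ("-", "~")]

-- for ch, replacement in trigraphs.items(): s = s.replace(f"??{ch}", replacement)
def process_trigraph (s : String) : String :=
  pvTrigraphs.foldl (fun acc p => PySem.Str.replace acc ("??" ++ p.1) p.2) s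

-- ===== PORT B =====
-- the same table, on code points (B reads single characters s[i], s[i+2])
def pvTriPairs : List (Char × Char) :=
  [('=', '#'), ('/', '\\'), ('\'', '^'), ('(', '['), (')', ']'),
   ('<', '{'), ('>', '}'), ('!', '|'), ('-', '~')]

-- B's while loop: at each position, if the next three chars are '?','?',key emit the
-- replacement and advance three, else emit the current char and advance one.
def pvScan (ps : List (Char × Char)) : List Char → List Char
  | [] => []
  | [a] => [a]
  | [a, b] => [a, b]
  | a :: b :: x :: t =>
    if a = '?' ∧ b = '?' then
      match List.lookup x ps with
      | some r => r :: pvScan ps t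
      | none => a :: pvScan ps (b :: x :: t)
    else a :: pvScan ps (b :: x :: t)
termination_by l => l.length

def process_trigraph_alt (s : String) : String :=
  String.ofList (pvScan pvTriPairs s.toList)

-- ===== PRECONDITION & SPEC =====
def Spec_process_trigraph (s : String) (out : String) : Prop := out = process_trigraph_alt s
instance (s : String) (out : String) : Decidable (Spec_process_trigraph s out) := by unfold Spec_process_trigraph; infer_instance

-- ===== CLAIM (what is proved, stated in full; the proofs are below) =====
def Claim_equal_process_trigraph : Prop := ∀ (s : String), Dom_process_trigraph s → Spec_process_trigraph s (process_trigraph s)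

-- ===== LEMMAS AND PROOFS =====

-- equation lemmas for pvScan
theorem pvScan_eq_match (ps : List (Char × Char)) (x w : Char) (t : List Char)
    (h : List.lookup x ps = some w) :
    pvScan ps ('?' :: '?' :: x :: t) = w :: pvScan ps t := by
  rw [pvScan]; simp [h]

theorem pvScan_eq_nomatch (ps : List (Char × Char)) (x : Char) (t : List Char)
    (h : List.lookup x ps = none) :
    pvScan ps ('?' :: '?' :: x :: t) = '?' :: pvScan ps ('?' :: x :: t) := by
  rw [pvScan]; simp [h]

theorem pvScan_skip (ps : List (Char × Char)) (a b x : Char) (t : List Char)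
    (h : ¬ (a = '?' ∧ b = '?')) :
    pvScan ps (a :: b :: x :: t) = a :: pvScan ps (b :: x :: t) := by
  rw [pvScan]; simp [h]

theorem pvScan_cons_ne (ps : List (Char × Char)) (a : Char) (l : List Char) (ha : a ≠ '?') :
    pvScan ps (a :: l) = a :: pvScan ps l := by
  match l with
  | [] => simp [pvScan]
  | [b] => simp [pvScan]
  | b :: x :: t => exact pvScan_skip ps a b x t (by simp [ha])

theorem pvScan_nomatch3 (ps : List (Char × Char)) (x : Char) (t : List Char)
    (hx : x ≠ '?') (hl : List.lookup x ps = none) :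
    pvScan ps ('?' :: '?' :: x :: t) = '?' :: '?' :: x :: pvScan ps t := by
  rw [pvScan_eq_nomatch ps x t hl]
  match t with
  | [] => simp [pvScan]
  | y :: t' =>
    rw [pvScan_skip ps '?' x y t' (by simp [hx]), pvScan_cons_ne ps x (y :: t') hx]

-- the identity scan: no keys, nothing is replaced
theorem pvScan_nilKeys : ∀ (n : Nat) (l : List Char), l.length ≤ n → pvScan [] l = l := by
  intro n
  induction n with
  | zero =>
    intro l h
    have hl : l = [] := List.eq_nil_of_length_eq_zero (by omega)
    subst hl; simp [pvScan]
  | succ n ih =>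
    intro l h
    match l with
    | [] => simp [pvScan]
    | [a] => simp [pvScan]
    | [a, b] => simp [pvScan]
    | a :: b :: x :: t =>
      by_cases hab : a = '?' ∧ b = '?'
      · obtain ⟨rfl, rfl⟩ := hab
        rw [pvScan_eq_nomatch [] x t (by simp)]
        have := ih ('?' :: x :: t) (by simp at h ⊢; omega)
        rw [this]
      · rw [pvScan_skip [] a b x t hab, ih (b :: x :: t) (by simp at h ⊢; omega)]

-- bridging A's str.replace to the single-key scan
theorem pvScan1_cons_of_not_prefix (c r ch : Char) (t : List Char)
    (hp : List.isPrefixOf ['?', '?', c] (ch :: t) = false) :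
    pvScan [(c, r)] (ch :: t) = ch :: pvScan [(c, r)] t := by
  match t with
  | [] => simp [pvScan]
  | [b] => simp [pvScan]
  | b :: x :: t3 =>
    simp only [List.isPrefixOf, Bool.and_eq_false_iff, beq_eq_false_iff_ne, ne_eq] at hp
    by_cases hab : ch = '?' ∧ b = '?'
    · obtain ⟨rfl, rfl⟩ := hab
      have hxc : x ≠ c := by
        rcases hp with h | h | h | h
        · exact absurd rfl h
        · exact absurd rfl h
        · exact fun he => h he.symm
        · simp at h
      have hb : (x == c) = false := beq_eq_false_iff_ne.mpr hxc
      exact pvScan_eq_nomatch [(c, r)] x t3 (by simp [List.lookup, hb])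
    · exact pvScan_skip [(c, r)] ch b x t3 hab

theorem pvGo (c r : Char) :
    ∀ (fuel : Nat) (l acc : List Char), l.length ≤ fuel →
      PySem.Chars.replace.go ['?', '?', c] [r] fuel l acc = acc.reverse ++ pvScan [(c, r)] l := by
  intro fuel
  induction fuel with
  | zero =>
    intro l acc h
    have hl : l = [] := List.eq_nil_of_length_eq_zero (by omega)
    subst hl
    simp [PySem.Chars.replace.go, pvScan]
  | succ fuel ih =>
    intro l acc h
    match l with
    | [] => simp [PySem.Chars.replace.go, pvScan]
    | ch :: t =>
      by_cases hp : List.isPrefixOf ['?', '?', c] (ch :: t) = true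
      · match t with
        | [] => simp [List.isPrefixOf] at hp
        | [b] => simp [List.isPrefixOf] at hp
        | b :: x :: t3 =>
          simp only [List.isPrefixOf, Bool.and_eq_true, beq_iff_eq] at hp
          obtain ⟨h1, h2, h3, -⟩ := hp
          subst h1; subst h2; subst h3
          have hstep : PySem.Chars.replace.go ['?', '?', c] [r] (fuel + 1) ('?' :: '?' :: c :: t3) acc
              = PySem.Chars.replace.go ['?', '?', c] [r] fuel t3 ([r].reverse ++ acc) := by
            have hpp : List.isPrefixOf ['?', '?', c] ('?' :: '?' :: c :: t3) = true := by
              simp [List.isPrefixOf]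
            simp [PySem.Chars.replace.go, hpp]
          rw [hstep, ih t3 ([r].reverse ++ acc) (by simp at h ⊢; omega)]
          rw [pvScan_eq_match [(c, r)] c r t3 (by simp [List.lookup])]
          simp
      · have hpf : List.isPrefixOf ['?', '?', c] (ch :: t) = false := by
          cases hb : List.isPrefixOf ['?', '?', c] (ch :: t)
          · rfl
          · exact absurd hb hp
        have hstep : PySem.Chars.replace.go ['?', '?', c] [r] (fuel + 1) (ch :: t) acc
            = PySem.Chars.replace.go ['?', '?', c] [r] fuel t (ch :: acc) := by
          simp [PySem.Chars.replace.go, hpf]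
        rw [hstep, ih t (ch :: acc) (by simp at h ⊢; omega)]
        rw [pvScan1_cons_of_not_prefix c r ch t hpf]
        simp

theorem pvReplace1 (c r : Char) (l : List Char) :
    PySem.Chars.replace l ['?', '?', c] [r] = pvScan [(c, r)] l := by
  have := pvGo c r l.length l [] (le_refl _)
  simpa [PySem.Chars.replace] using this

-- output-shape facts for the single-key scan (the replacement r is never '?')
theorem pvScan1_head (c r : Char) (t : List Char) (hc : c ≠ '?') :
    ∃ Y, pvScan [(c, r)] ('?' :: '?' :: t) = '?' :: Y ∨ pvScan [(c, r)] ('?' :: '?' :: t) = r :: Y := by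
  match t with
  | [] => exact ⟨['?'], Or.inl (by simp [pvScan])⟩
  | x :: t' =>
    by_cases hx : x = c
    · subst hx
      exact ⟨pvScan [(x, r)] t', Or.inr (pvScan_eq_match [(x, r)] x r t' (by simp [List.lookup]))⟩
    · have hb : (x == c) = false := beq_eq_false_iff_ne.mpr hx
      exact ⟨pvScan [(c, r)] ('?' :: x :: t'),
        Or.inl (pvScan_eq_nomatch [(c, r)] x t' (by simp [List.lookup, hb]))⟩

theorem pvScan1_second (c r : Char) (t : List Char) (hc : c ≠ '?') (hr : r ≠ '?') :
    ∀ k Y, pvScan [(c, r)] ('?' :: '?' :: t) = '?' :: k :: Y → k = '?' ∨ k = r := by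
  intro k Y hEq
  match t with
  | [] =>
    simp [pvScan] at hEq
    exact Or.inl hEq.1.symm
  | x :: t' =>
    by_cases hx : x = c
    · subst hx
      rw [pvScan_eq_match [(x, r)] x r t' (by simp [List.lookup])] at hEq
      exact absurd (List.head_eq_of_cons_eq hEq) hr
    · have hb : (x == c) = false := beq_eq_false_iff_ne.mpr hx
      rw [pvScan_eq_nomatch [(c, r)] x t' (by simp [List.lookup, hb])] at hEq
      have hEq2 : pvScan [(c, r)] ('?' :: x :: t') = k :: Y := List.tail_eq_of_cons_eq hEq
      by_cases hxq : x = '?'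
      · subst hxq
        obtain ⟨Y', hY'⟩ := pvScan1_head c r t' hc
        rcases hY' with hY' | hY' <;> rw [hY'] at hEq2
        · exact Or.inl (List.head_eq_of_cons_eq hEq2).symm
        · exact Or.inr (List.head_eq_of_cons_eq hEq2).symm
      · match t' with
        | [] =>
          simp [pvScan] at hEq2
          exact Or.inl hEq2.1.symm
        | y :: t'' =>
          rw [pvScan_skip [(c, r)] '?' x y t'' (by simp [hxq])] at hEq2
          exact Or.inl (List.head_eq_of_cons_eq hEq2).symm

theorem pvScan_consQ (ps : List (Char × Char)) (X : List Char)
    (h : ∀ k Y, X = '?' :: k :: Y → List.lookup k ps = none) :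
    pvScan ps ('?' :: X) = '?' :: pvScan ps X := by
  match X with
  | [] => simp [pvScan]
  | [k] => simp [pvScan]
  | k :: y :: Y' =>
    by_cases hk : k = '?'
    · subst hk
      exact pvScan_eq_nomatch ps y Y' (h y Y' rfl)
    · exact pvScan_skip ps '?' k y Y' (by simp [hk])

-- the heart: composing a later scan with an earlier single-key scan
theorem pvScan_compose (c r : Char) (ps : List (Char × Char))
    (hc : c ≠ '?') (hr : r ≠ '?')
    (hrp : List.lookup r ps = none) (hq : List.lookup '?' ps = none) :
    ∀ (n : Nat) (l : List Char), l.length ≤ n →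
      pvScan ps (pvScan [(c, r)] l) = pvScan ((c, r) :: ps) l := by
  intro n
  induction n with
  | zero =>
    intro l h
    have hl : l = [] := List.eq_nil_of_length_eq_zero (by omega)
    subst hl; simp [pvScan]
  | succ n ih =>
    intro l h
    match l with
    | [] => simp [pvScan]
    | [a] => simp [pvScan]
    | [a, b] => simp [pvScan]
    | a :: b :: x :: t =>
      have hlen : t.length + 3 ≤ n + 1 := by simpa using h
      by_cases hab : a = '?' ∧ b = '?'
      · obtain ⟨rfl, rfl⟩ := hab
        by_cases hxc : x = c
        · subst hxc
          rw [pvScan_eq_match [(x, r)] x r t (by simp [List.lookup]),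
            pvScan_cons_ne ps r _ hr, ih t (by omega),
            pvScan_eq_match ((x, r) :: ps) x r t (by simp [List.lookup])]
        · have hb : (x == c) = false := beq_eq_false_iff_ne.mpr hxc
          have hl1 : List.lookup x [(c, r)] = none := by simp [List.lookup, hb]
          cases hlx : List.lookup x ps with
          | some w =>
            have hx : x ≠ '?' := by rintro rfl; simp [hq] at hlx
            rw [pvScan_nomatch3 [(c, r)] x t hx hl1,
              pvScan_eq_match ps x w (pvScan [(c, r)] t) hlx, ih t (by omega),
              pvScan_eq_match ((c, r) :: ps) x w t (by simp [List.lookup, hb, hlx])]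
          | none =>
            by_cases hxq : x = '?'
            · subst hxq
              rw [pvScan_eq_nomatch [(c, r)] '?' t hl1,
                pvScan_consQ ps (pvScan [(c, r)] ('?' :: '?' :: t))
                  (by intro k Y hkY
                      rcases pvScan1_second c r t hc hr k Y hkY with rfl | rfl
                      exacts [hq, hrp]),
                ih ('?' :: '?' :: t) (by simp; omega),
                pvScan_eq_nomatch ((c, r) :: ps) '?' t (by simp [List.lookup, hb, hlx])]
            · rw [pvScan_nomatch3 [(c, r)] x t hxq hl1,
                pvScan_nomatch3 ps x (pvScan [(c, r)] t) hxq hlx, ih t (by omega),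
                pvScan_nomatch3 ((c, r) :: ps) x t hxq (by simp [List.lookup, hb, hlx])]
      · rw [pvScan_skip [(c, r)] a b x t hab]
        by_cases ha : a = '?'
        · subst ha
          have hbq : b ≠ '?' := fun hb' => hab ⟨rfl, hb'⟩
          have hX : pvScan [(c, r)] (b :: x :: t) = b :: pvScan [(c, r)] (x :: t) :=
            pvScan_cons_ne [(c, r)] b (x :: t) hbq
          rw [pvScan_consQ ps (pvScan [(c, r)] (b :: x :: t))
              (by intro k Y hkY
                  rw [hX] at hkY
                  exact absurd (List.head_eq_of_cons_eq hkY) hbq),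
            ih (b :: x :: t) (by simp; omega),
            pvScan_skip ((c, r) :: ps) '?' b x t hab]
        · rw [pvScan_cons_ne ps a _ ha, ih (b :: x :: t) (by simp; omega),
            pvScan_skip ((c, r) :: ps) a b x t hab]

-- the side conditions the nine concrete pairs satisfy
def pvGood : List (Char × Char) → Prop
  | [] => True
  | (c, r) :: rest =>
      c ≠ '?' ∧ r ≠ '?' ∧ List.lookup r rest = none ∧ List.lookup '?' rest = none ∧ pvGood rest

theorem pvFoldChars : ∀ (ps : List (Char × Char)), pvGood ps → ∀ (l : List Char),
    ps.foldl (fun acc p => PySem.Chars.replace acc ('?' :: '?' :: [p.1]) [p.2]) l = pvScan ps l := by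
  intro ps
  induction ps with
  | nil =>
    intro _ l
    rw [List.foldl_nil, pvScan_nilKeys l.length l le_rfl]
  | cons p rest ih =>
    obtain ⟨c, r⟩ := p
    rintro ⟨hc, hr, hrp, hq, hrest⟩ l
    rw [List.foldl_cons, ih hrest, pvReplace1]
    exact pvScan_compose c r rest hc hr hrp hq l.length l le_rfl

theorem pvA_chars (s : String) :
    process_trigraph s =
      String.ofList (pvTriPairs.foldl
        (fun acc p => PySem.Chars.replace acc ('?' :: '?' :: [p.1]) [p.2]) s.toList) := by
  simp only [process_trigraph, pvTrigraphs, pvTriPairs, List.foldl_cons, List.foldl_nil,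
    PySem.Str.replace]
  simp only [show ("??" ++ "=").toList = ['?', '?', '='] from by decide,
    show ("??" ++ "/").toList = ['?', '?', '/'] from by decide,
    show ("??" ++ "'").toList = ['?', '?', '\''] from by decide,
    show ("??" ++ "(").toList = ['?', '?', '('] from by decide,
    show ("??" ++ ")").toList = ['?', '?', ')'] from by decide,
    show ("??" ++ "<").toList = ['?', '?', '<'] from by decide,
    show ("??" ++ ">").toList = ['?', '?', '>'] from by decide,
    show ("??" ++ "!").toList = ['?', '?', '!'] from by decide,
    show ("??" ++ "-").toList = ['?', '?', '-'] from by decide,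
    show ("#" : String).toList = ['#'] from by decide,
    show ("\\" : String).toList = ['\\'] from by decide,
    show ("^" : String).toList = ['^'] from by decide,
    show ("[" : String).toList = ['['] from by decide,
    show ("]" : String).toList = [']'] from by decide,
    show ("{" : String).toList = ['{'] from by decide,
    show ("}" : String).toList = ['}'] from by decide,
    show ("|" : String).toList = ['|'] from by decide,
    show ("~" : String).toList = ['~'] from by decide,
    String.toList_ofList]

-- ===== VERDICT (by name: the statement is the Claim_ definition above) =====
theorem process_trigraph_spec : Claim_equal_process_trigraph := by
  intro s _
  show process_trigraph s = process_trigraph_alt s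
  rw [pvA_chars, pvFoldChars pvTriPairs (by simp [pvTriPairs, pvGood]) s.toList]
  rfl
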